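-- pv_equiv track=rewrite | github.com/mischakurth/Advent-of-Code | 2025/day06/solution.py | homework_check_part_two
-- ===== SOURCE A (Python) =====
-- def homework_check_part_two(hw):
--     result = 0
--     ops = hw[-1]
--     nums = []
--     for col in range(len(hw[0]) - 1, -1, -1):
--         digits = []
--         for line in hw[:-1]:
--             char = line[col]
--             if char == ' ' or char == '\n':
--                 continue
--             else:
--                 digits.append(char)
--         new_num = ''.join(digits)
--         if new_num:
--             nums.append(int(new_num))
--         if ops[col] in '+*':
--             if ops[col] == '+':
--                 result += sum(nums)
--             else:
--                 res = 1
--                 for num in nums: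
--                     res *= num
--                 result += res
--             nums = []
--     return result
-- ===== SOURCE B (Python) =====
-- def _evaluate(pairs):
--     # Recursive segment evaluation over the parsed (number-string, op-char) columns:
--     # skip columns before the first operator; at an operator column, take the run of
--     # following non-operator columns as its group and recurse on the remainder.
--     if not pairs:
--         return 0
--     (s, op), rest = pairs[0], pairs[1:]
--     if op != '+' and op != '*':
--         return _evaluate(rest)
--     k = 0
--     while k < len(rest) and rest[k][1] != '+' and rest[k][1] != '*':
--         k += 1
--     nums = [int(t) for t, _ in [(s, op)] + rest[:k] if t]
--     if op == '+':
--         val = sum(nums)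
--     else:
--         val = 1
--         for x in nums:
--             val *= x
--     return val + _evaluate(rest[k:])
--
-- def homework_check_part_two(hw):
--     ops = hw[-1]
--     body = hw[:-1]
--     pairs = []
--     for c in range(len(hw[0])):
--         s = ''.join(line[c] for line in body if line[c] != ' ' and line[c] != '\n')
--         pairs.append((s, ops[c]))
--     return _evaluate(pairs)
-- ===== Notes on version B (the rewrite author's own statement) =====
-- stated objective: alternative
-- what changed: B works in two stages: one pass parses every column into a (number-string, op-char) pair, then a recursive segmentation of that pair list splits it at operator columns and evaluates each operator's segment (sum or product) independently, instead of A's single right-to-left column scan with a running result/number accumulator.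
-- outside the precondition, e.g. on homework_check_part_two(['+', '5', '+']): A returns 5, B returns 5
import Mathlib
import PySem

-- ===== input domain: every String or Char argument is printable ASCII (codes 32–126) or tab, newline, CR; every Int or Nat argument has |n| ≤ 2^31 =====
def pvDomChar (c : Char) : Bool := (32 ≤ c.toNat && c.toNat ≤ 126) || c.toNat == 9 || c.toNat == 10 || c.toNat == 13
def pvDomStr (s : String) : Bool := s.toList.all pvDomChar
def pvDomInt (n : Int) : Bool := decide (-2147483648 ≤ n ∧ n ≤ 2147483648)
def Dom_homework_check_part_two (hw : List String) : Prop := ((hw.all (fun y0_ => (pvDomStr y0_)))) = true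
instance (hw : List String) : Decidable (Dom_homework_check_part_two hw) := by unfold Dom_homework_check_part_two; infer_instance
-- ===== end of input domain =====

-- B first parses every column into a (number-string, op-char) pair and then evaluates
-- that pair list by recursive segmentation at operator columns, instead of A's single
-- right-to-left scan with a running accumulator (objective: alternative).

-- ===== PORT A =====
def homework_check_part_two (hw : List String) : Int :=
  let ops : String := (PySem.List.pyGet? hw (-1)).getD ""          -- hw[-1]; none (IndexError) excluded by Pre_
  let n : Int := PySem.Str.len ((PySem.List.pyGet? hw 0).getD "")  -- len(hw[0]); none excluded by Pre_
  let body : List String := PySem.List.slice hw none (some (-1))   -- hw[:-1]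
  ((PySem.List.pyRange (n - 1) (-1) (-1)).foldl
    (fun (st : Int × List Int) col =>
      let digits : List Char := body.foldl
        (fun ds line =>
          match PySem.Str.pyGet? line col with                     -- line[col]; none (IndexError) excluded by Pre_
          | some ch => if ch = ' ' ∨ ch = '\n' then ds else ds ++ [ch]
          | none => ds) []
      let nums : List Int :=
        if digits ≠ [] then st.2 ++ [(PySem.Int.ofChars? digits).getD 0] else st.2  -- int(new_num); none (ValueError) excluded by Pre_
      let opc : Char := (PySem.Str.pyGet? ops col).getD ' '        -- ops[col]; none excluded by Pre_
      if opc = '+' ∨ opc = '*' then                                -- ops[col] in '+*'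
        if opc = '+' then (st.1 + nums.sum, ([] : List Int))
        else (st.1 + nums.foldl (· * ·) 1, ([] : List Int))        -- res = 1; for num in nums: res *= num
      else (st.1, nums)) ((0 : Int), ([] : List Int))).1

-- ===== PORT B =====
-- B-side helpers: the while-loop condition of Source B ("not an operator column") and the
-- per-pair optional parsed number ("int(t) ... if t", comprehension filter) as named functions
def pvNonOp (p : List Char × Char) : Bool := p.2 ≠ '+' && p.2 ≠ '*'
def pvOptNum (p : List Char × Char) : Option Int :=
  if p.1 ≠ [] then some ((PySem.Int.ofChars? p.1).getD 0) else none  -- int(t); none (ValueError) excluded by Pre_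

-- port of Source B's _evaluate: the index-k while loop and the slices rest[:k] / rest[k:] are
-- ported as takeWhile / dropWhile of the loop's condition (exact: the same split of the
-- list); the recursion carries a fuel counter (pairs.length at the top call) purely as a
-- structural-termination guard — the 0-fuel branch is never reached from pvEval
def pvEvalGo : Nat → List (List Char × Char) → Int
  | _, [] => 0
  | 0, _ :: _ => 0
  | fuel + 1, (s, op) :: rest =>
    if op ≠ '+' ∧ op ≠ '*' then pvEvalGo fuel rest
    else
      let nums := ((s, op) :: rest.takeWhile pvNonOp).filterMap pvOptNum
      (if op = '+' then nums.sum else nums.foldl (· * ·) 1)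
        + pvEvalGo fuel (rest.dropWhile pvNonOp)

def pvEval (pairs : List (List Char × Char)) : Int := pvEvalGo pairs.length pairs

def homework_check_part_two_alt (hw : List String) : Int :=
  let ops : String := (PySem.List.pyGet? hw (-1)).getD ""
  let body : List String := PySem.List.slice hw none (some (-1))
  let pairs : List (List Char × Char) :=
    (PySem.List.pyRange 0 (PySem.Str.len ((PySem.List.pyGet? hw 0).getD "")) 1).map
      (fun c =>
        (body.filterMap (fun line => (PySem.Str.pyGet? line c).bind
            (fun ch => if ch ≠ ' ' ∧ ch ≠ '\n' then some ch else none)),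
         (PySem.Str.pyGet? ops c).getD ' '))
  pvEval pairs

-- ===== PRECONDITION & SPEC =====
-- Pre_ excludes inputs where Python A raises: empty hw (IndexError on hw[-1]), rows shorter
-- than hw[0] (IndexError on line[col] / ops[col]), and non-digit characters in the first
-- len(hw[0]) positions of the body rows (ValueError from int()). The digit/space/newline
-- restriction also excludes some inputs on which A still returns, namely columns whose joined
-- characters are not plain digits yet still parse as an int (sign/whitespace/underscore, e.g.
-- ["+","5","+"]); A and B return the same value there.
def Pre_homework_check_part_two (hw : List String) : Prop :=
  hw ≠ [] ∧
  (hw.all (fun s => decide ((hw.headD "").toList.length ≤ s.toList.length))) = true ∧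
  (hw.dropLast.all (fun s =>
    (s.toList.take (hw.headD "").toList.length).all
      (fun c => c = ' ' || c = '\n' || ('0' ≤ c && c ≤ '9')))) = true
instance (hw : List String) : Decidable (Pre_homework_check_part_two hw) := by
  unfold Pre_homework_check_part_two; infer_instance
def pvWitness_homework_check_part_two : List String := ["12", " 3", "+*"]

def Spec_homework_check_part_two (hw : List String) (out : Int) : Prop := out = homework_check_part_two_alt hw
instance (hw : List String) (out : Int) : Decidable (Spec_homework_check_part_two hw out) := by unfold Spec_homework_check_part_two; infer_instance

-- ===== CLAIM (what is proved, stated in full; the proofs are below) =====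
def Claim_equal_homework_check_part_two : Prop := ∀ (hw : List String), Dom_homework_check_part_two hw → Pre_homework_check_part_two hw → Spec_homework_check_part_two hw (homework_check_part_two hw)

-- ===== LEMMAS AND PROOFS =====

-- A's per-column step, rephrased on the (digit-string, op-char) pair of the column
def pvStepP (st : Int × List Int) (p : List Char × Char) : Int × List Int :=
  let nums := st.2 ++ (pvOptNum p).toList
  if p.2 = '+' ∨ p.2 = '*' then
    if p.2 = '+' then (st.1 + nums.sum, []) else (st.1 + nums.foldl (· * ·) 1, [])
  else (st.1, nums)

-- the pair B parses for a column (A's fold is rewritten over these same pairs)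
def pvPair (body : List String) (ops : String) (c : Int) : List Char × Char :=
  (body.filterMap (fun line => (PySem.Str.pyGet? line c).bind
      (fun ch => if ch ≠ ' ' ∧ ch ≠ '\n' then some ch else none)),
   (PySem.Str.pyGet? ops c).getD ' ')

lemma pvPush (xs : List Int) (d : List Char) (v : Int) :
    (if d ≠ [] then xs ++ [v] else xs) = xs ++ (if d ≠ [] then some v else none).toList := by
  by_cases h : d = [] <;> simp [h]

-- A's digit-collecting foldl is a filterMap
lemma pvDigits_eq (col : Int) (body : List String) : ∀ (acc : List Char),
    body.foldl (fun ds line =>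
      match PySem.Str.pyGet? line col with
      | some ch => if ch = ' ' ∨ ch = '\n' then ds else ds ++ [ch]
      | none => ds) acc
    = acc ++ body.filterMap (fun line => (PySem.Str.pyGet? line col).bind
        (fun ch => if ch ≠ ' ' ∧ ch ≠ '\n' then some ch else none)) := by
  induction body with
  | nil => simp
  | cons s t ih =>
    intro acc
    simp only [List.foldl_cons, List.filterMap_cons]
    rw [ih]
    cases hg : PySem.Str.pyGet? s col with
    | none => simp
    | some ch =>
      by_cases h1 : ch = ' ' ∨ ch = '\n'
      · have h2 : ¬ (ch ≠ ' ' ∧ ch ≠ '\n') := by tauto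
        simp [h1, h2]
      · have h2 : ch ≠ ' ' ∧ ch ≠ '\n' := by tauto
        simp [h2]

-- A rewritten as a right fold of pvStepP over the per-column pairs (the pairs B parses)
lemma pvA_eq (hw : List String) :
    homework_check_part_two hw
      = (((PySem.List.pyRange 0 (PySem.Str.len ((PySem.List.pyGet? hw 0).getD "")) 1).map
            (pvPair (PySem.List.slice hw none (some (-1))) ((PySem.List.pyGet? hw (-1)).getD ""))).foldr
          (fun p st => pvStepP st p) ((0 : Int), ([] : List Int))).1 := by
  unfold homework_check_part_two
  show ((PySem.List.pyRange (PySem.Str.len ((PySem.List.pyGet? hw 0).getD "") - 1) (-1) (-1)).foldl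
    (fun (st : Int × List Int) col =>
      let digits : List Char := (PySem.List.slice hw none (some (-1))).foldl
        (fun ds line =>
          match PySem.Str.pyGet? line col with
          | some ch => if ch = ' ' ∨ ch = '\n' then ds else ds ++ [ch]
          | none => ds) []
      let nums : List Int :=
        if digits ≠ [] then st.2 ++ [(PySem.Int.ofChars? digits).getD 0] else st.2
      let opc : Char := (PySem.Str.pyGet? ((PySem.List.pyGet? hw (-1)).getD "") col).getD ' '
      if opc = '+' ∨ opc = '*' then
        if opc = '+' then (st.1 + nums.sum, ([] : List Int))
        else (st.1 + nums.foldl (· * ·) 1, ([] : List Int))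
      else (st.1, nums)) ((0 : Int), ([] : List Int))).1 = _
  rw [show PySem.List.pyRange (PySem.Str.len ((PySem.List.pyGet? hw 0).getD "") - 1) (-1) (-1)
        = (PySem.List.pyRange 0 (PySem.Str.len ((PySem.List.pyGet? hw 0).getD "")) 1).reverse by
      rw [PySem.List.pyRange_neg_one_eq_reverse]; norm_num]
  rw [List.foldl_reverse, List.foldr_map]
  congr 1
  congr 1
  funext col st
  simp only [pvDigits_eq, List.nil_append, pvPush]
  rfl

lemma pvFoldlMul_eq_prod (l : List Int) : l.foldl (· * ·) 1 = l.prod := by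
  rw [List.prod_eq_foldl]

-- fuel insensitivity of the guarded recursion
lemma pvGo_succ : ∀ (fuel : Nat) (P : List (List Char × Char)), P.length ≤ fuel →
    pvEvalGo (fuel + 1) P = pvEvalGo fuel P := by
  intro fuel
  induction fuel with
  | zero =>
    intro P hP
    have : P = [] := List.length_eq_zero_iff.mp (Nat.le_zero.mp hP)
    subst this; rfl
  | succ fuel ih =>
    intro P hP
    match P with
    | [] => rfl
    | (s, op) :: rest =>
      have hr : rest.length ≤ fuel := by
        simpa [Nat.succ_le_succ_iff] using hP
      show pvEvalGo (fuel + 1 + 1) ((s, op) :: rest) = pvEvalGo (fuel + 1) ((s, op) :: rest)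
      simp only [pvEvalGo]
      rw [ih rest hr, ih (rest.dropWhile pvNonOp) (le_trans (List.length_dropWhile_le _ _) hr)]

-- dropping the (discarded) leading non-operator columns does not change the value
lemma pvGo_dropWhile : ∀ (fuel : Nat) (t : List (List Char × Char)), t.length ≤ fuel →
    pvEvalGo fuel (t.dropWhile pvNonOp) = pvEvalGo fuel t := by
  intro fuel
  induction fuel with
  | zero =>
    intro t ht
    have : t = [] := List.length_eq_zero_iff.mp (Nat.le_zero.mp ht)
    subst this; rfl
  | succ fuel ih =>
    intro t ht
    match t with
    | [] => rfl
    | (s, op) :: rest =>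
      have hr : rest.length ≤ fuel := by simpa [Nat.succ_le_succ_iff] using ht
      by_cases h : pvNonOp (s, op) = true
      · have hno : op ≠ '+' ∧ op ≠ '*' := by
          simpa [pvNonOp, Bool.and_eq_true, decide_eq_true_iff] using h
        rw [List.dropWhile_cons_of_pos h]
        show pvEvalGo (fuel + 1) (rest.dropWhile pvNonOp) = pvEvalGo (fuel + 1) ((s, op) :: rest)
        simp only [pvEvalGo, if_pos hno]
        rw [pvGo_succ fuel (rest.dropWhile pvNonOp) (le_trans (List.length_dropWhile_le _ _) hr),
            ih rest hr]
      · rw [List.dropWhile_cons_of_neg h]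

-- main invariant: folding A's step from the right over the pair list yields
-- (B's segment-recursion value, the reversed numbers of the leading non-operator
-- columns — exactly A's discarded leftover group)
lemma pvMainGo : ∀ (fuel : Nat) (P : List (List Char × Char)), P.length ≤ fuel →
    P.foldr (fun p st => pvStepP st p) ((0 : Int), ([] : List Int))
      = (pvEvalGo fuel P, ((P.takeWhile pvNonOp).filterMap pvOptNum).reverse) := by
  intro fuel
  induction fuel with
  | zero =>
    intro P hP
    have : P = [] := List.length_eq_zero_iff.mp (Nat.le_zero.mp hP)
    subst this; rfl
  | succ fuel ih =>
    intro P hP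
    match P with
    | [] => rfl
    | (s, op) :: rest =>
      have hr : rest.length ≤ fuel := by simpa [Nat.succ_le_succ_iff] using hP
      rw [List.foldr_cons, ih rest hr]
      by_cases h : op = '+' ∨ op = '*'
      · have hno : ¬ (op ≠ '+' ∧ op ≠ '*') := by tauto
        have hb : pvNonOp (s, op) = false := by
          rcases h with h | h <;> simp [pvNonOp, h]
        rw [List.takeWhile_cons_of_neg (by simp [hb])]
        show pvStepP (pvEvalGo fuel rest, ((rest.takeWhile pvNonOp).filterMap pvOptNum).reverse) (s, op)
          = (pvEvalGo (fuel + 1) ((s, op) :: rest), (List.filterMap pvOptNum []).reverse)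
        simp only [pvEvalGo, if_neg hno, pvStepP, if_pos h]
        rw [pvGo_dropWhile fuel rest hr]
        rcases h with h | h
        · subst h
          rw [if_pos rfl, if_pos rfl]
          refine Prod.ext ?_ rfl
          simp only [List.filterMap_cons]
          cases hn : pvOptNum (s, '+') with
          | none => simp [List.sum_reverse]; ring
          | some v => simp [List.sum_append, List.sum_reverse]; ring
        · subst h
          rw [if_neg (by decide), if_neg (by decide)]
          refine Prod.ext ?_ rfl
          simp only [List.filterMap_cons, pvFoldlMul_eq_prod]
          cases hn : pvOptNum (s, '*') with
          | none => simp [List.prod_reverse]; ring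
          | some v => simp [List.prod_append, List.prod_reverse]; ring
      · have hyes : op ≠ '+' ∧ op ≠ '*' := by tauto
        have hb : pvNonOp (s, op) = true := by
          simp [pvNonOp, hyes.1, hyes.2]
        rw [List.takeWhile_cons_of_pos hb]
        show pvStepP (pvEvalGo fuel rest, ((rest.takeWhile pvNonOp).filterMap pvOptNum).reverse) (s, op)
          = (pvEvalGo (fuel + 1) ((s, op) :: rest),
             (List.filterMap pvOptNum ((s, op) :: rest.takeWhile pvNonOp)).reverse)
        simp only [pvEvalGo, if_pos hyes, pvStepP, if_neg h, List.filterMap_cons]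
        cases hn : pvOptNum (s, op) with
        | none => simp
        | some v => simp

-- ===== VERDICT (by name: the statement is the Claim_ definition above) =====
theorem homework_check_part_two_spec : Claim_equal_homework_check_part_two := by
  intro hw _ _
  unfold Spec_homework_check_part_two
  rw [pvA_eq]
  rw [pvMainGo _ _ (le_refl _)]
  rfl
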